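-- pv_equiv track=rewrite | github.com/ASTXRTYS/Crewaistudio | auren/agents/neuros/neuros_api_production.py | determine_mode
-- ===== SOURCE A (Python) =====
-- from typing import Dict, Any, Optional, List
-- from enum import Enum
--
-- class NEUROSMode(str, Enum):
--     """NEUROS operational modes from YAML"""
--     BASELINE = "BASELINE"
--     HYPOTHESIS = "HYPOTHESIS"
--     COMPANION = "COMPANION"
--     SYNTHESIS = "SYNTHESIS"
--     COACH = "COACH"
--     PROVOCATEUR = "PROVOCATEUR"
--
-- def determine_mode(message: str, context: Dict[str, Any]) -> NEUROSMode:
--     """Determine NEUROS mode based on message content and context"""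
--     message_lower = message.lower()
--
--     # Mode detection logic based on YAML patterns
--     if any(word in message_lower for word in ["stress", "anxious", "worried", "overwhelmed"]):
--         return NEUROSMode.COMPANION
--     elif any(word in message_lower for word in ["theory", "hypothesis", "test", "experiment"]):
--         return NEUROSMode.HYPOTHESIS
--     elif any(word in message_lower for word in ["push", "challenge", "capable", "potential"]):
--         return NEUROSMode.PROVOCATEUR
--     elif any(word in message_lower for word in ["plan", "protocol", "routine", "schedule"]):
--         return NEUROSMode.COACH
--     elif any(word in message_lower for word in ["patterns", "trends", "analysis", "data"]):
--         return NEUROSMode.SYNTHESIS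
--     else:
--         return NEUROSMode.BASELINE
-- ===== SOURCE B (Python) =====
-- from enum import Enum
--
-- class NEUROSMode(str, Enum):
--     """NEUROS operational modes from YAML"""
--     BASELINE = "BASELINE"
--     HYPOTHESIS = "HYPOTHESIS"
--     COMPANION = "COMPANION"
--     SYNTHESIS = "SYNTHESIS"
--     COACH = "COACH"
--     PROVOCATEUR = "PROVOCATEUR"
--
-- # Flat keyword -> priority index; modes listed by priority.
-- _MODES = [NEUROSMode.COMPANION, NEUROSMode.HYPOTHESIS, NEUROSMode.PROVOCATEUR,
--           NEUROSMode.COACH, NEUROSMode.SYNTHESIS]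
-- _KEYWORD_PRIORITY = {kw: i for i, group in enumerate([
--     ["stress", "anxious", "worried", "overwhelmed"],
--     ["theory", "hypothesis", "test", "experiment"],
--     ["push", "challenge", "capable", "potential"],
--     ["plan", "protocol", "routine", "schedule"],
--     ["patterns", "trends", "analysis", "data"],
-- ]) for kw in group}
--
-- def determine_mode(message, context):
--     """Determine NEUROS mode: min-priority keyword hit over a flat keyword index."""
--     message_lower = message.lower()
--     best = None
--     for kw, p in _KEYWORD_PRIORITY.items():
--         if kw in message_lower:
--             best = p if best is None else min(best, p)
--     return NEUROSMode.BASELINE if best is None else _MODES[best]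
-- ===== Notes on version B (the rewrite author's own statement) =====
-- stated objective: alternative
-- what changed: Instead of a priority-ordered early-return chain of grouped any() checks, B builds a flat keyword->priority index, scans every keyword once keeping the minimum matched priority, and indexes a mode list; correct because group order equals priority order, so first matching group = minimum priority among all matching keywords.
import Mathlib
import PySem

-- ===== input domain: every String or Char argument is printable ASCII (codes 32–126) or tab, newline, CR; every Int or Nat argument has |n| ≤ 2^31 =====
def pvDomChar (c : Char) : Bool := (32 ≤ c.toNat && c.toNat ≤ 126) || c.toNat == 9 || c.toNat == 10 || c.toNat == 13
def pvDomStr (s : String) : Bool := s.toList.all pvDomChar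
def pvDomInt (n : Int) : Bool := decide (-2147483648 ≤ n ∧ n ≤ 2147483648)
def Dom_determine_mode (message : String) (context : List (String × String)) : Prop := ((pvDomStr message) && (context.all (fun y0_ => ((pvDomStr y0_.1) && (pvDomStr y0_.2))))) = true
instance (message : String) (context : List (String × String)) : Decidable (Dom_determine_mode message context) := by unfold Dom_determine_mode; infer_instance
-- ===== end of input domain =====

-- B replaces A's priority-ordered early-return chain with a flat keyword->priority index scanned once,
-- keeping the minimum matched priority; equal because group order equals priority order.


-- ===== PORT A =====
def determine_mode (message : String) (context : List (String × String)) : String :=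
  let message_lower := PySem.Str.lower message
  if ["stress", "anxious", "worried", "overwhelmed"].any (fun word => PySem.Str.isIn word message_lower) then
    "COMPANION"
  else if ["theory", "hypothesis", "test", "experiment"].any (fun word => PySem.Str.isIn word message_lower) then
    "HYPOTHESIS"
  else if ["push", "challenge", "capable", "potential"].any (fun word => PySem.Str.isIn word message_lower) then
    "PROVOCATEUR"
  else if ["plan", "protocol", "routine", "schedule"].any (fun word => PySem.Str.isIn word message_lower) then
    "COACH"
  else if ["patterns", "trends", "analysis", "data"].any (fun word => PySem.Str.isIn word message_lower) then
    "SYNTHESIS"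
  else
    "BASELINE"

-- ===== PORT B =====
-- Flat keyword -> priority association list (Python dict in insertion order) and the modes by priority.
def pvKeywordPriority : List (String × Nat) :=
  [("stress", 0), ("anxious", 0), ("worried", 0), ("overwhelmed", 0),
   ("theory", 1), ("hypothesis", 1), ("test", 1), ("experiment", 1),
   ("push", 2), ("challenge", 2), ("capable", 2), ("potential", 2),
   ("plan", 3), ("protocol", 3), ("routine", 3), ("schedule", 3),
   ("patterns", 4), ("trends", 4), ("analysis", 4), ("data", 4)]

def pvModes : List String := ["COMPANION", "HYPOTHESIS", "PROVOCATEUR", "COACH", "SYNTHESIS"]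

-- one loop step: if the keyword occurs, merge its priority into the running minimum
def pvStep (ml : String) (best : Option Nat) (kp : String × Nat) : Option Nat :=
  if PySem.Str.isIn kp.1 ml then
    some (match best with | none => kp.2 | some b => min b kp.2)
  else best

def determine_mode_alt (message : String) (context : List (String × String)) : String :=
  let message_lower := PySem.Str.lower message
  match pvKeywordPriority.foldl (pvStep message_lower) none with
  | none => "BASELINE"
  | some p => pvModes.getD p "BASELINE"

-- ===== PRECONDITION & SPEC =====
def Spec_determine_mode (message : String) (context : List (String × String)) (out : String) : Prop := out = determine_mode_alt message context
instance (message : String) (context : List (String × String)) (out : String) : Decidable (Spec_determine_mode message context out) := by unfold Spec_determine_mode; infer_instance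

-- ===== CLAIM =====
def Claim_equal_determine_mode : Prop := ∀ (message : String) (context : List (String × String)), Dom_determine_mode message context → Spec_determine_mode message context (determine_mode message context)

-- ===== LEMMAS AND PROOFS =====

-- folding a block of keywords that all carry the same priority p equals one merged "any" test
theorem pvfold_group (ml : String) (acc : Option Nat) (kws : List String) (p : Nat) :
    (kws.map (fun k => (k, p))).foldl (pvStep ml) acc
    = if kws.any (fun k => PySem.Str.isIn k ml) then
        some (match acc with | none => p | some b => min b p)
      else acc := by
  induction kws generalizing acc with
  | nil => simp
  | cons k ks ih =>
    simp only [List.map_cons, List.foldl_cons, List.any_cons]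
    rw [ih]
    by_cases hk : PySem.Str.isIn k ml = true
    · have hstep : pvStep ml acc (k, p)
          = some (match acc with | none => p | some b => min b p) := by
        simp only [pvStep, hk, if_true]
      by_cases ha : (ks.any fun k => PySem.Str.isIn k ml) = true
      · rw [if_pos ha, hstep, if_pos (by rw [hk, ha]; rfl)]
        cases acc <;> simp
      · rw [if_neg ha, hstep]
        rw [Bool.not_eq_true] at ha
        rw [if_pos (by rw [hk, ha]; rfl)]
    · rw [Bool.not_eq_true] at hk
      have hstep : pvStep ml acc (k, p) = acc := by
        simp only [pvStep, hk]; rfl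
      rw [hstep]
      simp only [hk, Bool.false_or]

theorem pvKeywordPriority_split :
    pvKeywordPriority =
      (["stress", "anxious", "worried", "overwhelmed"].map (fun k => (k, 0)))
      ++ (["theory", "hypothesis", "test", "experiment"].map (fun k => (k, 1)))
      ++ (["push", "challenge", "capable", "potential"].map (fun k => (k, 2)))
      ++ (["plan", "protocol", "routine", "schedule"].map (fun k => (k, 3)))
      ++ (["patterns", "trends", "analysis", "data"].map (fun k => (k, 4))) := rfl

-- ===== VERDICT =====
theorem determine_mode_spec : Claim_equal_determine_mode := by
  intro message context _
  unfold Spec_determine_mode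
  simp only [determine_mode, determine_mode_alt]
  rw [pvKeywordPriority_split]
  simp only [List.foldl_append, pvfold_group]
  by_cases h0 : (["stress", "anxious", "worried", "overwhelmed"].any fun k => PySem.Str.isIn k (PySem.Str.lower message)) = true <;>
  by_cases h1 : (["theory", "hypothesis", "test", "experiment"].any fun k => PySem.Str.isIn k (PySem.Str.lower message)) = true <;>
  by_cases h2 : (["push", "challenge", "capable", "potential"].any fun k => PySem.Str.isIn k (PySem.Str.lower message)) = true <;>
  by_cases h3 : (["plan", "protocol", "routine", "schedule"].any fun k => PySem.Str.isIn k (PySem.Str.lower message)) = true <;>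
  by_cases h4 : (["patterns", "trends", "analysis", "data"].any fun k => PySem.Str.isIn k (PySem.Str.lower message)) = true <;>
  simp only [Bool.not_eq_true] at h0 h1 h2 h3 h4 <;>
  simp only [h0, h1, h2, h3, h4] <;> rfl
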